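-- pv_equiv track=rewrite | github.com/KBhandari11/LLMNeuron | evaluate_randomized_associated.py | pick_largest_community
-- ===== SOURCE A (Python) =====
-- def flatten_comprehension(matrix):
--      return [item for row in matrix for item in row]
--
-- def pick_largest_community(community_data_lists):
--     size = -1
--     community_idx = None
--     for comm_name, community in community_data_lists.items():
--         if len(community["dataset"]) > size:
--             size = len(community["dataset"])
--             community_idx = comm_name
--     non_idx_community = [idx for idx in community_data_lists if idx !=  community_idx]
--     return (community_idx, size),community_data_lists[community_idx]["dataset"], flatten_comprehension([community_data_lists[non_idx]["dataset"] for non_idx in non_idx_community])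
-- ===== SOURCE B (Python) =====
-- def pick_largest_community(community_data_lists):
--     order = sorted(community_data_lists.items(),
--                    key=lambda kv: len(kv[1]["dataset"]), reverse=True)
--     community_idx, top = order[0]
--     rest = [x for name, comm in community_data_lists.items()
--             if name != community_idx for x in comm["dataset"]]
--     return (community_idx, len(top["dataset"])), top["dataset"], rest
-- ===== Notes on version B (the rewrite author's own statement) =====
-- stated objective: alternative
-- what changed: Replaces A's manual running-max loop (size/community_idx accumulators) and per-key re-lookups by one stable reverse sort on dataset length, taking the sorted head as the winner and flattening the remaining entries' datasets directly from the items.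
import Mathlib
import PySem

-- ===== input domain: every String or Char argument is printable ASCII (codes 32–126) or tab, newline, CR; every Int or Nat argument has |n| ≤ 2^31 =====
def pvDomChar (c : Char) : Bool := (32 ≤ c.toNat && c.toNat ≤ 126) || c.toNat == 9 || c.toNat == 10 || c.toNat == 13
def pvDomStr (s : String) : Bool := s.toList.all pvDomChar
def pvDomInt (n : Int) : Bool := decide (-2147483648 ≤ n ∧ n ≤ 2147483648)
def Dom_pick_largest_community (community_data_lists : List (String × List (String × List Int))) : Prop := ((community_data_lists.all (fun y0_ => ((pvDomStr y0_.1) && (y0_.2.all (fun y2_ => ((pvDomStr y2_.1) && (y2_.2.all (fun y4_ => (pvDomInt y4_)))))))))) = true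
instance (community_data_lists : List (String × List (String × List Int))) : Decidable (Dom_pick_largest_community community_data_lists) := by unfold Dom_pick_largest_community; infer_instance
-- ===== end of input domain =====

-- B replaces A's running-max loop by one stable reverse sort on dataset length and takes the
-- sorted head (then flattens the rest in original order); objective: alternative decomposition.

-- ===== PORT A =====

-- dict lookup, first match; the default is only reached outside Pre_ (Python raises KeyError there)
def pvDictGetD {ν : Type} (d : List (String × ν)) (k : String) (dflt : ν) : ν :=
  match d.find? (fun p => p.1 == k) with
  | some p => p.2
  | none => dflt

-- community["dataset"]
def pvDataset (community : List (String × List Int)) : List Int :=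
  pvDictGetD community "dataset" []

-- [item for row in matrix for item in row]
def flatten_comprehension (matrix : List (List Int)) : List Int :=
  matrix.flatMap (fun row => row)

def pick_largest_community (community_data_lists : List (String × List (String × List Int))) : (String × Int) × List Int × List Int :=
  -- size = -1; community_idx = None; for comm_name, community in …: if len(…) > size: …
  let st := community_data_lists.foldl
    (fun (acc : Int × Option String) p =>
      if ((pvDataset p.2).length : Int) > acc.1
      then (((pvDataset p.2).length : Int), some p.1)
      else acc)
    ((-1 : Int), none)
  let size := st.1
  let community_idx := st.2
  let non_idx_community := (community_data_lists.map Prod.fst).filter (fun k => decide (some k ≠ community_idx))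
  ((community_idx.getD "", size),
   pvDataset (match community_idx with
              | some k => pvDictGetD community_data_lists k []
              | none => []),
   flatten_comprehension (non_idx_community.map (fun k => pvDataset (pvDictGetD community_data_lists k []))))

-- ===== PORT B =====

def pick_largest_community_alt (community_data_lists : List (String × List (String × List Int))) : (String × Int) × List Int × List Int :=
  let order := PySem.List.sorted community_data_lists (fun kv => (pvDataset kv.2).length) true
  match order with
  | [] => (("", -1), [], [])  -- order[0]: IndexError in Python, outside Pre_
  | (community_idx, top) :: _ =>
    let rest := (community_data_lists.filter (fun p => p.1 != community_idx)).flatMap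
      (fun p => pvDataset p.2)
    ((community_idx, ((pvDataset top).length : Int)), pvDataset top, rest)

-- ===== PRECONDITION & SPEC =====
-- Pre_ excludes: the empty dict (A raises KeyError on the None lookup); association lists with
-- duplicate outer or inner keys, which cannot arise from a Python dict (insertion overwrites),
-- so first-match vs last-write behaviour there is nobody's specification; and inner dicts
-- missing the "dataset" key (A raises KeyError).
def Pre_pick_largest_community (community_data_lists : List (String × List (String × List Int))) : Prop :=
  community_data_lists ≠ [] ∧
  (community_data_lists.map Prod.fst).Nodup ∧
  ∀ p ∈ community_data_lists, (p.2.map Prod.fst).Nodup ∧ "dataset" ∈ p.2.map Prod.fst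
instance (community_data_lists : List (String × List (String × List Int))) : Decidable (Pre_pick_largest_community community_data_lists) := by unfold Pre_pick_largest_community; infer_instance

def pvWitness_pick_largest_community : (List (String × List (String × List Int))) :=
  [("a", [("dataset", [1, 2])]), ("b", [("dataset", [3])])]

def Spec_pick_largest_community (community_data_lists : List (String × List (String × List Int))) (out : (String × Int) × List Int × List Int) : Prop := out = pick_largest_community_alt community_data_lists
instance (community_data_lists : List (String × List (String × List Int))) (out : (String × Int) × List Int × List Int) : Decidable (Spec_pick_largest_community community_data_lists out) := by unfold Spec_pick_largest_community; infer_instance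

-- ===== CLAIM (what is proved, stated in full; the proofs are below) =====
def Claim_equal_pick_largest_community : Prop := ∀ (community_data_lists : List (String × List (String × List Int))), Dom_pick_largest_community community_data_lists → Pre_pick_largest_community community_data_lists → Spec_pick_largest_community community_data_lists (pick_largest_community community_data_lists)

-- ===== LEMMAS AND PROOFS =====

-- head of an insertion step
theorem pv_head_insertBy {α : Type} (before : α → α → Bool) (x : α) (acc : List α) :
    (PySem.List.insertBy before x acc).head? =
      some (match acc.head? with
            | none => x
            | some h => if before x h then x else h) := by
  cases acc with
  | nil => simp [PySem.List.insertBy]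
  | cons h t =>
    simp only [PySem.List.insertBy, List.head?]
    split_ifs <;> simp_all

-- in a nodup-keyed association list, find? by the key of a member returns that member
theorem pv_find_of_mem_nodup {ν : Type} (l : List (String × ν)) (m : String × ν)
    (hn : (l.map Prod.fst).Nodup) (hm : m ∈ l) :
    l.find? (fun p => p.1 == m.1) = some m := by
  induction l with
  | nil => cases hm
  | cons p t ih =>
    simp only [List.map_cons, List.nodup_cons] at hn
    rcases List.mem_cons.mp hm with h | h
    · subst h; simp [List.find?]
    · have hne : p.1 ≠ m.1 := by
        intro he
        exact hn.1 (he ▸ List.mem_map_of_mem h)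
      rw [List.find?_cons_of_neg (by simp [hne])]
      exact ih hn.2 h

-- one step of the "first strict max" reading of insertion into a reverse-sorted list
def pvPick {α : Type} (before : α → α → Bool) (o : Option α) (x : α) : Option α :=
  some (match o with
        | none => x
        | some h => if before x h then x else h)

theorem pv_head_foldl_insertBy {α : Type} (before : α → α → Bool) (xs : List α) :
    ∀ acc : List α,
      (xs.foldl (fun a x => PySem.List.insertBy before x a) acc).head? =
        xs.foldl (pvPick before) acc.head? := by
  induction xs with
  | nil => intro acc; rfl
  | cons x t ih =>
    intro acc
    simp only [List.foldl_cons]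
    rw [ih, pv_head_insertBy]
    rfl

-- A's running-max fold computes (key, name) of the "first strict max" pick
theorem pv_fold_repr {α : Type} (key : α → Nat) (name : α → String) :
    ∀ (l : List α) (o : Option α),
      l.foldl (fun (acc : Int × Option String) p =>
          if ((key p : Int) > acc.1) then (((key p) : Int), some (name p)) else acc)
        (match o with
         | none => ((-1 : Int), (none : Option String))
         | some h => ((key h : Int), some (name h)))
      = (match l.foldl (pvPick (fun a b => decide (key b < key a))) o with
         | none => ((-1 : Int), none)
         | some h => ((key h : Int), some (name h))) := by
  intro l
  induction l with
  | nil => intro o; rfl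
  | cons p t ih =>
    intro o
    simp only [List.foldl_cons]
    have hstep :
        (if ((key p : Int) > (match o with
              | none => ((-1 : Int), (none : Option String))
              | some h => ((key h : Int), some (name h))).1)
         then (((key p) : Int), some (name p))
         else (match o with
               | none => ((-1 : Int), (none : Option String))
               | some h => ((key h : Int), some (name h))))
        = (match pvPick (fun a b => decide (key b < key a)) o p with
           | none => ((-1 : Int), (none : Option String))
           | some h => ((key h : Int), some (name h))) := by
      cases o with
      | none =>
        simp only [pvPick]
        rw [if_pos (by omega)]
      | some h =>
        simp only [pvPick]
        by_cases hlt : key h < key p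
        · rw [if_pos (by exact_mod_cast hlt), if_pos (by simpa using hlt)]
        · rw [if_neg (by exact_mod_cast hlt), if_neg (by simpa using hlt)]
    rw [hstep]
    exact ih (pvPick (fun a b => decide (key b < key a)) o p)

theorem pick_largest_community_spec_aux :
    ∀ (l : List (String × List (String × List Int))),
      Pre_pick_largest_community l →
      pick_largest_community l = pick_largest_community_alt l := by
  intro l hpre
  obtain ⟨hne, hnod, _⟩ := hpre
  obtain ⟨m, t, horder⟩ : ∃ m t,
      PySem.List.sorted l (fun kv => (pvDataset kv.2).length) true = m :: t := by
    cases hs : PySem.List.sorted l (fun kv => (pvDataset kv.2).length) true with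
    | nil => exact absurd ((PySem.List.sorted_eq_nil_iff _ _ _).mp hs) hne
    | cons a b => exact ⟨a, b, rfl⟩
  have hm : m ∈ l := by
    have : m ∈ PySem.List.sorted l (fun kv => (pvDataset kv.2).length) true := by
      rw [horder]; exact List.mem_cons_self
    simpa [PySem.List.mem_sorted] using this
  -- head of the sorted list = result of the pvPick fold
  have hhead : l.foldl (pvPick (fun a b =>
      decide ((pvDataset b.2).length < (pvDataset a.2).length))) none = some m := by
    have h1 := pv_head_foldl_insertBy (fun (a b : String × List (String × List Int)) =>
      decide ((pvDataset b.2).length < (pvDataset a.2).length)) l []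
    rw [← PySem.List.sorted_rev_eq_foldl_insertBy l (fun kv => (pvDataset kv.2).length), horder] at h1
    simpa using h1.symm
  -- A's fold state
  have hst : l.foldl
      (fun (acc : Int × Option String) p =>
        if (((pvDataset p.2).length : Int) > acc.1)
        then (((pvDataset p.2).length : Int), some p.1)
        else acc)
      ((-1 : Int), none)
      = (((pvDataset m.2).length : Int), some m.1) := by
    have h2 := pv_fold_repr (fun kv : String × List (String × List Int) => (pvDataset kv.2).length)
      Prod.fst l none
    rw [hhead] at h2
    exact h2
  -- lookup of the winner
  have hget : pvDictGetD l m.1 [] = m.2 := by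
    unfold pvDictGetD
    rw [pv_find_of_mem_nodup l m hnod hm]
  -- flattening the rest in original order, with nodup keys
  have hflat :
      ((l.map Prod.fst).filter (fun k => decide (some k ≠ some m.1))).map
        (fun k => pvDataset (pvDictGetD l k []))
      = (l.filter (fun p => p.1 != m.1)).map (fun p => pvDataset p.2) := by
    rw [List.filter_map]
    rw [List.map_map]
    have hfe : (l.filter ((fun k => decide (some k ≠ some m.1)) ∘ Prod.fst))
        = l.filter (fun p => p.1 != m.1) := by
      apply List.filter_congr
      intro p _
      simp only [Function.comp, bne, ne_eq, Option.some.injEq, decide_not]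
      rw [Bool.eq_iff_iff]
      simp
    rw [hfe]
    apply List.map_congr_left
    intro p hp
    have hpl : p ∈ l := List.mem_of_mem_filter hp
    have hpne : p.1 ≠ m.1 := by
      have := List.of_mem_filter hp
      simpa [bne] using this
    simp only [Function.comp]
    unfold pvDictGetD
    rw [pv_find_of_mem_nodup l p hnod hpl]
  -- assemble
  unfold pick_largest_community pick_largest_community_alt
  rw [horder, hst]
  simp only [flatten_comprehension, hget, hflat, List.flatMap_map]
  rfl

-- ===== VERDICT (by name: the statement is the Claim_ definition above) =====
theorem pick_largest_community_spec : Claim_equal_pick_largest_community := by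
  intro l _ hpre
  exact pick_largest_community_spec_aux l hpre
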